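-- pv_equiv track=rewrite | github.com/jsuppe/speech3 | reader_analysis.py | _align_words
-- ===== SOURCE A (Python) =====
-- from typing import List, Dict, Optional, Tuple
--
-- def _align_words(reference: List[str], actual: List[str]) -> List[Dict]:
--     """
--     Align reference and actual words using edit distance.
--     Returns list of alignment results.
--     """
--     m, n = len(reference), len(actual)
--
--     # DP table
--     dp = [[0] * (n + 1) for _ in range(m + 1)]
--
--     # Initialize
--     for i in range(m + 1):
--         dp[i][0] = i
--     for j in range(n + 1):
--         dp[0][j] = j
--
--     # Fill table
--     for i in range(1, m + 1):
--         for j in range(1, n + 1):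
--             if reference[i-1] == actual[j-1]:
--                 dp[i][j] = dp[i-1][j-1]
--             else:
--                 dp[i][j] = 1 + min(
--                     dp[i-1][j],    # deletion
--                     dp[i][j-1],    # insertion
--                     dp[i-1][j-1]   # substitution
--                 )
--
--     # Backtrack to get alignment
--     alignment = []
--     i, j = m, n
--
--     while i > 0 or j > 0:
--         if i > 0 and j > 0 and reference[i-1] == actual[j-1]:
--             alignment.append({
--                 "reference": reference[i-1],
--                 "actual": actual[j-1],
--                 "status": "correct",
--             })
--             i -= 1
--             j -= 1
--         elif i > 0 and j > 0 and dp[i][j] == dp[i-1][j-1] + 1: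
--             alignment.append({
--                 "reference": reference[i-1],
--                 "actual": actual[j-1],
--                 "status": "substitution",
--             })
--             i -= 1
--             j -= 1
--         elif j > 0 and dp[i][j] == dp[i][j-1] + 1:
--             alignment.append({
--                 "reference": None,
--                 "actual": actual[j-1],
--                 "status": "insertion",
--             })
--             j -= 1
--         else:
--             alignment.append({
--                 "reference": reference[i-1],
--                 "actual": None,
--                 "status": "deletion",
--             })
--             i -= 1
--
--     alignment.reverse()
--     return alignment
-- ===== SOURCE B (Python) =====
-- from typing import List, Dict
--
-- def _align_words(reference: List[str], actual: List[str]) -> List[Dict]: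
--     """Forward DP that builds the alignment itself: each cell carries
--     (cost, reversed alignment as a persistent linked list), keeping only one
--     row at a time; no backtrack pass over a full table."""
--     n = len(actual)
--     # row of cells for i = 0; a chain is None or (entry, tail)
--     cell = (0, None)
--     prev = [cell]
--     for j, w in enumerate(actual, 1):
--         cell = (j, ({"reference": None, "actual": w, "status": "insertion"}, cell[1]))
--         prev.append(cell)
--     for i, r in enumerate(reference, 1):
--         left = (i, ({"reference": r, "actual": None, "status": "deletion"}, prev[0][1]))
--         curr = [left]
--         for j, w in enumerate(actual, 1):
--             diag = prev[j - 1]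
--             up = prev[j]
--             if r == w:
--                 cell = (diag[0], ({"reference": r, "actual": w, "status": "correct"}, diag[1]))
--             else:
--                 c = 1 + min(up[0], left[0], diag[0])
--                 if c == diag[0] + 1:
--                     cell = (c, ({"reference": r, "actual": w, "status": "substitution"}, diag[1]))
--                 elif c == left[0] + 1:
--                     cell = (c, ({"reference": None, "actual": w, "status": "insertion"}, left[1]))
--                 else:
--                     cell = (c, ({"reference": r, "actual": None, "status": "deletion"}, up[1]))
--             curr.append(cell)
--             left = cell
--         prev = curr
--     out = []
--     node = prev[n][1]
--     while node is not None:
--         out.append(node[0])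
--         node = node[1]
--     out.reverse()
--     return out
-- ===== Notes on version B (the rewrite author's own statement) =====
-- stated objective: alternative
-- what changed: B builds the alignment forward inside the DP itself: each cell carries (cost, reversed alignment as a structure-shared linked list) and only one row is kept at a time, so the full table and A's separate backtrack pass disappear.
import Mathlib
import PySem

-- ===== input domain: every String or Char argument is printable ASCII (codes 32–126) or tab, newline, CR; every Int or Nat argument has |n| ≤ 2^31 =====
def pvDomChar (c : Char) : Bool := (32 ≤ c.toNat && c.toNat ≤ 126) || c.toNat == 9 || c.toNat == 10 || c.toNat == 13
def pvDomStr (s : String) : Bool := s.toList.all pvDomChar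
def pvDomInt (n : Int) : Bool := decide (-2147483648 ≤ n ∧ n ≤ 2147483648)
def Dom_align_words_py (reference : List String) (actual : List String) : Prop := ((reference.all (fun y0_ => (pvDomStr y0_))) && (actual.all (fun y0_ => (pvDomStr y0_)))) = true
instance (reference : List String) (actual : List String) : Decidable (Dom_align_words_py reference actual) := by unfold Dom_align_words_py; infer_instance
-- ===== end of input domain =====

-- B replaces A's backtrack over a full DP table by a forward DP whose cells carry the
-- (reversed, structure-shared) alignment itself, keeping only one row at a time.

-- an alignment record {"reference": …, "actual": …, "status": …} as an association list
abbrev pvRec := List (String × Option String)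

def pvCorrect (r w : String) : pvRec := [("reference", some r), ("actual", some w), ("status", some "correct")]
def pvSub (r w : String) : pvRec := [("reference", some r), ("actual", some w), ("status", some "substitution")]
def pvInsRec (w : String) : pvRec := [("reference", none), ("actual", some w), ("status", some "insertion")]
def pvDelRec (r : String) : pvRec := [("reference", some r), ("actual", none), ("status", some "deletion")]

-- ===== PORT A =====
-- dp[i][j] reads/writes (all indices produced by A are in range, so List.getD/List.set are exact)
def pvGet2 (dp : List (List Int)) (i j : Nat) : Int := (dp.getD i []).getD j 0
def pvSet2 (dp : List (List Int)) (i j : Nat) (v : Int) : List (List Int) :=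
  dp.set i ((dp.getD i []).set j v)

-- the three init/fill loops of A, loop for loop
def pvFillA (reference actual : List String) (m n : Nat) : List (List Int) :=
  let dp := List.replicate (m+1) (List.replicate (n+1) (0:Int))
  let dp := (List.range (m+1)).foldl (fun dp i => pvSet2 dp i 0 (i:Int)) dp
  let dp := (List.range (n+1)).foldl (fun dp j => pvSet2 dp 0 j (j:Int)) dp
  (List.range m).foldl (fun dp i0 =>
    (List.range n).foldl (fun dp j0 =>
      let i := i0 + 1
      let j := j0 + 1
      if reference.getD (i-1) "" = actual.getD (j-1) "" then
        pvSet2 dp i j (pvGet2 dp (i-1) (j-1))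
      else
        pvSet2 dp i j (1 + min (min (pvGet2 dp (i-1) j) (pvGet2 dp i (j-1))) (pvGet2 dp (i-1) (j-1)))) dp) dp

-- A's backtrack while-loop (fuel m+n; each iteration decreases i+j, as proved below)
def pvBackA (reference actual : List String) (dp : List (List Int)) :
    Nat → Nat → Nat → List pvRec → List pvRec
  | 0, _, _, acc => acc
  | fuel+1, i, j, acc =>
    if i = 0 ∧ j = 0 then acc
    else if 0 < i ∧ 0 < j ∧ reference.getD (i-1) "" = actual.getD (j-1) "" then
      pvBackA reference actual dp fuel (i-1) (j-1)
        (acc ++ [pvCorrect (reference.getD (i-1) "") (actual.getD (j-1) "")])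
    else if 0 < i ∧ 0 < j ∧ pvGet2 dp i j = pvGet2 dp (i-1) (j-1) + 1 then
      pvBackA reference actual dp fuel (i-1) (j-1)
        (acc ++ [pvSub (reference.getD (i-1) "") (actual.getD (j-1) "")])
    else if 0 < j ∧ pvGet2 dp i j = pvGet2 dp i (j-1) + 1 then
      pvBackA reference actual dp fuel i (j-1) (acc ++ [pvInsRec (actual.getD (j-1) "")])
    else
      pvBackA reference actual dp fuel (i-1) j (acc ++ [pvDelRec (reference.getD (i-1) "")])

def align_words_py (reference : List String) (actual : List String) :
    List (List (String × Option String)) :=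
  let m := reference.length
  let n := actual.length
  let dp := pvFillA reference actual m n
  (pvBackA reference actual dp (m+n) m n []).reverse

-- ===== PORT B =====
-- a cell is (cost, reversed alignment chain); the Python linked list (e, tail) is a Lean List
abbrev pvCell := Int × List pvRec

def pvRow0 (actual : List String) : List pvCell :=
  ((PySem.List.enumerate actual 1).foldl
    (fun (st : List pvCell × pvCell) jw =>
      let cell : pvCell := (jw.1, pvInsRec jw.2 :: st.2.2)
      (st.1 ++ [cell], cell))
    ([((0:Int), ([] : List pvRec))], ((0:Int), ([] : List pvRec)))).1

def pvRowStep (_reference actual : List String) (prev : List pvCell) (i : Int) (r : String) :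
    List pvCell :=
  let first : pvCell := (i, pvDelRec r :: (PySem.List.pyGetD prev 0 ((0:Int), [])).2)
  ((PySem.List.enumerate actual 1).foldl
    (fun (st : List pvCell × pvCell) jw =>
      let j := jw.1
      let w := jw.2
      let left := st.2
      let diag := PySem.List.pyGetD prev (j-1) ((0:Int), [])
      let up := PySem.List.pyGetD prev j ((0:Int), [])
      let cell : pvCell :=
        if r = w then (diag.1, pvCorrect r w :: diag.2)
        else
          let c := 1 + min (min up.1 left.1) diag.1
          if c = diag.1 + 1 then (c, pvSub r w :: diag.2)
          else if c = left.1 + 1 then (c, pvInsRec w :: left.2)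
          else (c, pvDelRec r :: up.2)
      (st.1 ++ [cell], cell))
    ([first], first)).1

-- the unwinding while-loop over the linked list
def pvUnwind : List pvRec → List pvRec → List pvRec
  | [], out => out
  | e :: t, out => pvUnwind t (out ++ [e])

def align_words_py_alt (reference : List String) (actual : List String) :
    List (List (String × Option String)) :=
  let n := actual.length
  let prev := (PySem.List.enumerate reference 1).foldl
    (fun prev ir => pvRowStep reference actual prev ir.1 ir.2) (pvRow0 actual)
  let node := (prev.getD n ((0:Int), [])).2
  (pvUnwind node []).reverse

-- ===== PRECONDITION & SPEC =====
def Spec_align_words_py (reference : List String) (actual : List String) (out : List (List (String × Option String))) : Prop := out = align_words_py_alt reference actual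
instance (reference : List String) (actual : List String) (out : List (List (String × Option String))) : Decidable (Spec_align_words_py reference actual out) := by unfold Spec_align_words_py; infer_instance

-- ===== CLAIM (what is proved, stated in full; the proofs are below) =====
def Claim_equal_align_words_py : Prop := ∀ (reference : List String) (actual : List String), Dom_align_words_py reference actual → Spec_align_words_py reference actual (align_words_py reference actual)

-- ===== LEMMAS AND PROOFS =====

-- the edit-distance recurrence both programs compute
def pvDpf (reference actual : List String) : Nat → Nat → Int
  | i, 0 => (i : Int)
  | 0, j+1 => (j:Int)+1
  | i+1, j+1 =>
    if reference.getD i "" = actual.getD j "" then pvDpf reference actual i j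
    else 1 + min (min (pvDpf reference actual i (j+1)) (pvDpf reference actual (i+1) j))
                 (pvDpf reference actual i j)
  termination_by i j => i + j

-- the (reversed) alignment A's backtrack priority produces, as a fueled recursion
def pvTrace (reference actual : List String) : Nat → Nat → Nat → List pvRec
  | 0, _, _ => []
  | fuel+1, i, j =>
    if i = 0 ∧ j = 0 then []
    else if 0 < i ∧ 0 < j ∧ reference.getD (i-1) "" = actual.getD (j-1) "" then
      pvCorrect (reference.getD (i-1) "") (actual.getD (j-1) "") :: pvTrace reference actual fuel (i-1) (j-1)
    else if 0 < i ∧ 0 < j ∧ pvDpf reference actual i j = pvDpf reference actual (i-1) (j-1) + 1 then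
      pvSub (reference.getD (i-1) "") (actual.getD (j-1) "") :: pvTrace reference actual fuel (i-1) (j-1)
    else if 0 < j ∧ pvDpf reference actual i j = pvDpf reference actual i (j-1) + 1 then
      pvInsRec (actual.getD (j-1) "") :: pvTrace reference actual fuel i (j-1)
    else
      pvDelRec (reference.getD (i-1) "") :: pvTrace reference actual fuel (i-1) j

def pvTraceR (reference actual : List String) (i j : Nat) : List pvRec :=
  pvTrace reference actual (i+j) i j

theorem pvDpf_zero_left (reference actual : List String) (j : Nat) :
    pvDpf reference actual 0 j = (j : Int) := by
  cases j <;> simp [pvDpf]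

theorem pvDpf_zero_right (reference actual : List String) (i : Nat) :
    pvDpf reference actual i 0 = (i : Int) := by
  cases i <;> simp [pvDpf]

theorem pvTrace_eq_of_le (reference actual : List String) :
    ∀ f f' i j, i + j ≤ f → i + j ≤ f' →
      pvTrace reference actual f i j = pvTrace reference actual f' i j := by
  intro f
  induction f with
  | zero =>
    intro f' i j h h'
    have hi : i = 0 := by omega
    have hj : j = 0 := by omega
    subst hi; subst hj
    cases f' <;> simp [pvTrace]
  | succ f ih =>
    intro f' i j h h'
    cases f' with
    | zero =>
      have hi : i = 0 := by omega
      have hj : j = 0 := by omega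
      subst hi; subst hj
      simp [pvTrace]
    | succ f' =>
      by_cases h00 : i = 0 ∧ j = 0
      · simp [pvTrace, h00]
      · simp only [pvTrace, if_neg h00]
        by_cases hm : 0 < i ∧ 0 < j ∧ reference.getD (i-1) "" = actual.getD (j-1) ""
        · rw [if_pos hm, if_pos hm, ih f' (i-1) (j-1) (by omega) (by omega)]
        · rw [if_neg hm, if_neg hm]
          by_cases hs : 0 < i ∧ 0 < j ∧
              pvDpf reference actual i j = pvDpf reference actual (i-1) (j-1) + 1
          · rw [if_pos hs, if_pos hs, ih f' (i-1) (j-1) (by omega) (by omega)]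
          · rw [if_neg hs, if_neg hs]
            by_cases hins : 0 < j ∧
                pvDpf reference actual i j = pvDpf reference actual i (j-1) + 1
            · rw [if_pos hins, if_pos hins, ih f' i (j-1) (by omega) (by omega)]
            · rw [if_neg hins, if_neg hins]
              have hipos : 0 < i := by
                by_contra hi0
                have hi0' : i = 0 := by omega
                subst hi0'
                have hj0 : 0 < j := by omega
                exact hins ⟨hj0, by rw [pvDpf_zero_left, pvDpf_zero_left]; omega⟩
              rw [ih f' (i-1) j (by omega) (by omega)]

-- the branch taken at a cell, as equations about pvTraceR
theorem pvTraceR_zero (reference actual : List String) : pvTraceR reference actual 0 0 = [] := by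
  simp [pvTraceR, pvTrace]

theorem pvTraceR_row0 (reference actual : List String) (j : Nat) :
    pvTraceR reference actual 0 (j+1) = pvInsRec (actual.getD j "") :: pvTraceR reference actual 0 j := by
  show pvTrace reference actual (0+(j+1)) 0 (j+1) = _
  have h1 : 0 + (j+1) = j + 1 := by omega
  rw [h1]
  simp only [pvTrace]
  rw [if_neg (by omega)]
  rw [if_neg (by simp), if_neg (by simp)]
  rw [if_pos ⟨by omega, by rw [pvDpf_zero_left, pvDpf_zero_left]; omega⟩]
  simp [pvTraceR]

theorem pvTraceR_col0 (reference actual : List String) (i : Nat) :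
    pvTraceR reference actual (i+1) 0 = pvDelRec (reference.getD i "") :: pvTraceR reference actual i 0 := by
  show pvTrace reference actual ((i+1)+0) (i+1) 0 = _
  have h1 : (i+1) + 0 = i + 1 := by omega
  rw [h1]
  simp only [pvTrace]
  rw [if_neg (by omega)]
  rw [if_neg (by simp), if_neg (by simp), if_neg (by simp)]
  simp [pvTraceR]

-- one interior cell of B, computed from the three neighbour cells, is the cell of (i+1, j+1)
theorem pvCellStep (reference actual : List String) (i j : Nat)
    (r w : String) (hr : r = reference.getD i "") (hw : w = actual.getD j "") :
    (if r = w then (pvDpf reference actual i j, pvCorrect r w :: pvTraceR reference actual i j)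
     else if 1 + min (min (pvDpf reference actual i (j+1)) (pvDpf reference actual (i+1) j))
                     (pvDpf reference actual i j) = pvDpf reference actual i j + 1 then
       (1 + min (min (pvDpf reference actual i (j+1)) (pvDpf reference actual (i+1) j))
                (pvDpf reference actual i j), pvSub r w :: pvTraceR reference actual i j)
     else if 1 + min (min (pvDpf reference actual i (j+1)) (pvDpf reference actual (i+1) j))
                     (pvDpf reference actual i j) = pvDpf reference actual (i+1) j + 1 then
       (1 + min (min (pvDpf reference actual i (j+1)) (pvDpf reference actual (i+1) j))
                (pvDpf reference actual i j), pvInsRec w :: pvTraceR reference actual (i+1) j)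
     else
       (1 + min (min (pvDpf reference actual i (j+1)) (pvDpf reference actual (i+1) j))
                (pvDpf reference actual i j), pvDelRec r :: pvTraceR reference actual i (j+1)))
    = (pvDpf reference actual (i+1) (j+1), pvTraceR reference actual (i+1) (j+1)) := by
  subst hr; subst hw
  have hfuel : (i+1) + (j+1) = (i+j+1) + 1 := by omega
  have hunf : pvTraceR reference actual (i+1) (j+1) =
      pvTrace reference actual ((i+j+1)+1) (i+1) (j+1) := by
    rw [pvTraceR, hfuel]
  have hTd : pvTrace reference actual (i+j+1) i j = pvTraceR reference actual i j :=
    pvTrace_eq_of_le reference actual (i+j+1) (i+j) i j (by omega) (by omega)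
  have hTi : pvTrace reference actual (i+j+1) (i+1) j = pvTraceR reference actual (i+1) j :=
    pvTrace_eq_of_le reference actual (i+j+1) ((i+1)+j) (i+1) j (by omega) (by omega)
  have hTu : pvTrace reference actual (i+j+1) i (j+1) = pvTraceR reference actual i (j+1) :=
    pvTrace_eq_of_le reference actual (i+j+1) (i+(j+1)) i (j+1) (by omega) (by omega)
  rw [hunf]
  generalize hF : i + j + 1 = F at hTd hTi hTu ⊢
  simp only [pvTrace]
  simp only [Nat.add_sub_cancel]
  rw [if_neg (show ¬(i+1 = 0 ∧ j+1 = 0) by omega), hTd, hTi, hTu]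
  by_cases heq : reference.getD i "" = actual.getD j ""
  · have hcv : pvDpf reference actual (i+1) (j+1) = pvDpf reference actual i j := by
      rw [pvDpf, if_pos heq]
    rw [if_pos heq, if_pos ⟨Nat.succ_pos i, Nat.succ_pos j, heq⟩, hcv]
  · have hcv : pvDpf reference actual (i+1) (j+1) =
        1 + min (min (pvDpf reference actual i (j+1)) (pvDpf reference actual (i+1) j))
                (pvDpf reference actual i j) := by
      rw [pvDpf, if_neg heq]
    rw [if_neg heq, hcv,
      if_neg (show ¬(0 < i+1 ∧ 0 < j+1 ∧ reference.getD i "" = actual.getD j "")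
        from fun h => heq h.2.2)]
    by_cases hsub : 1 + min (min (pvDpf reference actual i (j+1)) (pvDpf reference actual (i+1) j))
        (pvDpf reference actual i j) = pvDpf reference actual i j + 1
    · rw [if_pos hsub,
        if_pos (show 0 < i+1 ∧ 0 < j+1 ∧
            1 + min (min (pvDpf reference actual i (j+1)) (pvDpf reference actual (i+1) j))
              (pvDpf reference actual i j) = pvDpf reference actual i j + 1
          from ⟨Nat.succ_pos i, Nat.succ_pos j, hsub⟩)]
    · rw [if_neg hsub,
        if_neg (show ¬(0 < i+1 ∧ 0 < j+1 ∧
            1 + min (min (pvDpf reference actual i (j+1)) (pvDpf reference actual (i+1) j))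
              (pvDpf reference actual i j) = pvDpf reference actual i j + 1)
          from fun h => hsub h.2.2)]
      by_cases hins : 1 + min (min (pvDpf reference actual i (j+1)) (pvDpf reference actual (i+1) j))
          (pvDpf reference actual i j) = pvDpf reference actual (i+1) j + 1
      · rw [if_pos hins,
          if_pos (show 0 < j+1 ∧
              1 + min (min (pvDpf reference actual i (j+1)) (pvDpf reference actual (i+1) j))
                (pvDpf reference actual i j) = pvDpf reference actual (i+1) j + 1
            from ⟨Nat.succ_pos j, hins⟩)]
      · rw [if_neg hins,
          if_neg (show ¬(0 < j+1 ∧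
              1 + min (min (pvDpf reference actual i (j+1)) (pvDpf reference actual (i+1) j))
                (pvDpf reference actual i j) = pvDpf reference actual (i+1) j + 1)
            from fun h => hins h.2)]

-- ---- A side: the filled table computes pvDpf ----

def pvShape (m n : Nat) (dp : List (List Int)) : Prop :=
  dp.length = m+1 ∧ ∀ row ∈ dp, row.length = n+1

theorem pvGetD_set_self {α : Type} (l : List α) (i : Nat) (a d : α) (h : i < l.length) :
    (l.set i a).getD i d = a := by
  simp [List.getD_eq_getElem?_getD, h]

theorem pvGetD_set_ne {α : Type} (l : List α) {i j : Nat} (a d : α) (h : i ≠ j) :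
    (l.set i a).getD j d = l.getD j d := by
  simp [List.getD_eq_getElem?_getD, h]

theorem pvGetD_mem {α : Type} (l : List α) (i : Nat) (d : α) (h : i < l.length) :
    l.getD i d ∈ l := by
  rw [List.getD_eq_getElem?_getD, List.getElem?_eq_getElem h, Option.getD_some]
  exact List.getElem_mem h

theorem pvShape_set2 {m n : Nat} {dp : List (List Int)} (h : pvShape m n dp)
    {i j : Nat} (hi : i ≤ m) (v : Int) : pvShape m n (pvSet2 dp i j v) := by
  obtain ⟨h1, h2⟩ := h
  constructor
  · simp [pvSet2, h1]
  · intro row hrow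
    rcases List.mem_or_eq_of_mem_set hrow with h' | h'
    · exact h2 row h'
    · subst h'
      rw [List.length_set]
      exact h2 _ (pvGetD_mem _ _ _ (by omega))

theorem pvGet2_set2 {m n : Nat} {dp : List (List Int)} (h : pvShape m n dp)
    {i j i' j' : Nat} (hi : i ≤ m) (hi' : i' ≤ m) (hj' : j' ≤ n) (v : Int) :
    pvGet2 (pvSet2 dp i j v) i' j' =
      if i = i' ∧ j = j' then v else pvGet2 dp i' j' := by
  obtain ⟨h1, h2⟩ := h
  have hrowlen : (dp.getD i []).length = n+1 := h2 _ (pvGetD_mem _ _ _ (by omega))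
  unfold pvGet2 pvSet2
  by_cases hii : i = i'
  · subst hii
    rw [pvGetD_set_self _ _ _ _ (by omega)]
    by_cases hjj : j = j'
    · subst hjj
      rw [pvGetD_set_self _ _ _ _ (by omega), if_pos ⟨rfl, rfl⟩]
    · rw [pvGetD_set_ne _ _ _ hjj, if_neg (by tauto)]
  · rw [pvGetD_set_ne _ _ _ hii, if_neg (by tauto)]

-- invariant propagation through a foldl over List.range (loop shape of A's 'for … in range(k)')
theorem pvFoldInv {α : Type} (P : Nat → α → Prop) (f : α → Nat → α) (a : α) (k : Nat)
    (h0 : P 0 a) (hs : ∀ l b, l < k → P l b → P (l+1) (f b l)) :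
    P k ((List.range k).foldl f a) := by
  induction k with
  | zero => simpa
  | succ k ih =>
    rw [List.range_succ, List.foldl_append]
    exact hs k _ (Nat.lt_succ_self k) (ih (fun l b hl hb => hs l b (by omega) hb))

theorem pvFillA_get (reference actual : List String) (m n : Nat) :
    ∀ i j, i ≤ m → j ≤ n →
      pvGet2 (pvFillA reference actual m n) i j = pvDpf reference actual i j := by
  have hrep : pvShape m n (List.replicate (m+1) (List.replicate (n+1) (0:Int))) := by
    constructor
    · simp
    · intro row hrow
      rw [List.eq_of_mem_replicate hrow]
      simp
  have hrepget : ∀ i j, i ≤ m → j ≤ n →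
      pvGet2 (List.replicate (m+1) (List.replicate (n+1) (0:Int))) i j = 0 := by
    intro i j hi hj
    simp [pvGet2, List.getD_eq_getElem?_getD, Nat.lt_succ_of_le hi, Nat.lt_succ_of_le hj]
  -- stage 1: dp[i][0] = i
  have h1 : pvShape m n ((List.range (m+1)).foldl (fun dp i => pvSet2 dp i 0 (i:Int))
        (List.replicate (m+1) (List.replicate (n+1) (0:Int)))) ∧
      ∀ i j, i ≤ m → j ≤ n →
        pvGet2 ((List.range (m+1)).foldl (fun dp i => pvSet2 dp i 0 (i:Int))
          (List.replicate (m+1) (List.replicate (n+1) (0:Int)))) i j =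
          if j = 0 then (i:Int) else 0 := by
    have := pvFoldInv (fun k dp => pvShape m n dp ∧ ∀ i j, i ≤ m → j ≤ n →
        pvGet2 dp i j = if j = 0 ∧ i < k then (i:Int) else 0)
      (fun dp i => pvSet2 dp i 0 (i:Int)) _ (m+1)
      ⟨hrep, by intro i j hi hj; simp [hrepget i j hi hj]⟩
      (by
        intro l dp hl hP
        obtain ⟨hsh, hget⟩ := hP
        refine ⟨pvShape_set2 hsh (by omega) _, ?_⟩
        intro i j hi hj
        rw [pvGet2_set2 hsh (by omega) hi hj, hget i j hi hj]
        by_cases hij : l = i ∧ 0 = j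
        · rw [if_pos hij, if_pos ⟨hij.2.symm, by omega⟩]
          rw [← hij.1]
        · rw [if_neg hij]
          have hiff : (j = 0 ∧ i < l) ↔ (j = 0 ∧ i < l+1) := by omega
          simp only [hiff])
    refine ⟨this.1, ?_⟩
    intro i j hi hj
    rw [this.2 i j hi hj]
    have hiff : (j = 0 ∧ i < m+1) ↔ (j = 0) := by omega
    simp only [hiff]
  -- stage 2: additionally dp[0][j] = j
  have h2 : ∀ dp1, (pvShape m n dp1 ∧ ∀ i j, i ≤ m → j ≤ n →
        pvGet2 dp1 i j = if j = 0 then (i:Int) else 0) →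
      pvShape m n ((List.range (n+1)).foldl (fun dp j => pvSet2 dp 0 j (j:Int)) dp1) ∧
      ∀ i j, i ≤ m → j ≤ n →
        pvGet2 ((List.range (n+1)).foldl (fun dp j => pvSet2 dp 0 j (j:Int)) dp1) i j =
          if i = 0 then (j:Int) else if j = 0 then (i:Int) else 0 := by
    intro dp1 hP1
    obtain ⟨hsh1, hget1⟩ := hP1
    have := pvFoldInv (fun k dp => pvShape m n dp ∧ ∀ i j, i ≤ m → j ≤ n →
        pvGet2 dp i j = if i = 0 ∧ j < k then (j:Int) else if j = 0 then (i:Int) else 0)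
      (fun dp j => pvSet2 dp 0 j (j:Int)) dp1 (n+1)
      ⟨hsh1, by
        intro i j hi hj
        rw [hget1 i j hi hj]
        simp⟩
      (by
        intro l dp hl hP
        obtain ⟨hsh, hget⟩ := hP
        refine ⟨pvShape_set2 hsh (by omega) _, ?_⟩
        intro i j hi hj
        rw [pvGet2_set2 hsh (by omega) hi hj, hget i j hi hj]
        by_cases hij : 0 = i ∧ l = j
        · rw [if_pos hij, if_pos ⟨hij.1.symm, by omega⟩, ← hij.2]
        · rw [if_neg hij]
          by_cases hi0 : i = 0
          · subst hi0
            have hlj : l ≠ j := fun h => hij ⟨rfl, h⟩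
            have hiff : (j < l) ↔ (j < l+1) := by omega
            simp only [hiff]
          · have h1 : ¬(i = 0 ∧ j < l) := by tauto
            have h2 : ¬(i = 0 ∧ j < l+1) := by tauto
            rw [if_neg h1, if_neg h2])
    refine ⟨this.1, ?_⟩
    intro i j hi hj
    rw [this.2 i j hi hj]
    have hiff : (i = 0 ∧ j < n+1) ↔ (i = 0) := by omega
    simp only [hiff]
  -- stage 3: the main fill
  intro i j hi hj
  have hstage2 := h2 _ h1
  show pvGet2 ((List.range m).foldl _ _) i j = _
  have main := pvFoldInv (fun k dp => pvShape m n dp ∧ ∀ i j, i ≤ m → j ≤ n →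
      pvGet2 dp i j = if i ≤ k ∨ j = 0 then pvDpf reference actual i j else 0)
    (fun dp i0 =>
      (List.range n).foldl (fun dp j0 =>
        let i := i0 + 1
        let j := j0 + 1
        if reference.getD (i-1) "" = actual.getD (j-1) "" then
          pvSet2 dp i j (pvGet2 dp (i-1) (j-1))
        else
          pvSet2 dp i j (1 + min (min (pvGet2 dp (i-1) j) (pvGet2 dp i (j-1)))
            (pvGet2 dp (i-1) (j-1)))) dp)
    _ m
    (by
      refine ⟨hstage2.1, ?_⟩
      intro i j hi hj
      rw [hstage2.2 i j hi hj]
      by_cases hi0 : i = 0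
      · subst hi0; simp [pvDpf_zero_left]
      · by_cases hj0 : j = 0
        · subst hj0; simp [pvDpf_zero_right, hi0]
        · simp [hi0, hj0])
    (by
      intro l dp hl hP
      obtain ⟨hsh, hget⟩ := hP
      have inner := pvFoldInv (fun kj dp => pvShape m n dp ∧ ∀ i j, i ≤ m → j ≤ n →
          pvGet2 dp i j = if i ≤ l ∨ j = 0 ∨ (i = l+1 ∧ j ≤ kj) then pvDpf reference actual i j
            else 0)
        (fun dp j0 =>
          let i := l + 1
          let j := j0 + 1
          if reference.getD (i-1) "" = actual.getD (j-1) "" then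
            pvSet2 dp i j (pvGet2 dp (i-1) (j-1))
          else
            pvSet2 dp i j (1 + min (min (pvGet2 dp (i-1) j) (pvGet2 dp i (j-1)))
              (pvGet2 dp (i-1) (j-1)))) dp n
        (by
          refine ⟨hsh, ?_⟩
          intro i j hi hj
          rw [hget i j hi hj]
          have hiff : (i ≤ l ∨ j = 0) ↔ (i ≤ l ∨ j = 0 ∨ (i = l+1 ∧ j ≤ 0)) := by omega
          simp only [hiff])
        (by
          intro l2 dp2 hl2 hP2
          obtain ⟨hsh2, hget2⟩ := hP2
          have hrd : pvGet2 dp2 l l2 = pvDpf reference actual l l2 := by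
            rw [hget2 l l2 (by omega) (by omega)]
            simp
          have hru : pvGet2 dp2 l (l2+1) = pvDpf reference actual l (l2+1) := by
            rw [hget2 l (l2+1) (by omega) (by omega)]
            simp
          have hrl : pvGet2 dp2 (l+1) l2 = pvDpf reference actual (l+1) l2 := by
            rw [hget2 (l+1) l2 (by omega) (by omega), if_pos (by omega)]
          have hval : pvDpf reference actual (l+1) (l2+1) =
              if reference.getD l "" = actual.getD l2 "" then pvDpf reference actual l l2
              else 1 + min (min (pvDpf reference actual l (l2+1))
                (pvDpf reference actual (l+1) l2)) (pvDpf reference actual l l2) := by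
            rw [pvDpf]
          simp only [Nat.add_sub_cancel]
          split_ifs with heqc
          · have hv : pvGet2 dp2 l l2 = pvDpf reference actual (l+1) (l2+1) := by
              rw [hrd, hval, if_pos heqc]
            refine ⟨pvShape_set2 hsh2 (by omega) _, ?_⟩
            intro i j hi hj
            rw [pvGet2_set2 hsh2 (by omega) hi hj, hv]
            by_cases hij : l+1 = i ∧ l2+1 = j
            · rw [if_pos hij, if_pos (by right; right; omega), ← hij.1, ← hij.2]
            · rw [if_neg hij, hget2 i j hi hj]
              have hiff : (i ≤ l ∨ j = 0 ∨ (i = l+1 ∧ j ≤ l2)) ↔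
                  (i ≤ l ∨ j = 0 ∨ (i = l+1 ∧ j ≤ l2+1)) := by omega
              simp only [hiff]
          · have hv : 1 + min (min (pvGet2 dp2 l (l2+1)) (pvGet2 dp2 (l+1) l2))
                (pvGet2 dp2 l l2) = pvDpf reference actual (l+1) (l2+1) := by
              rw [hrd, hru, hrl, hval, if_neg heqc]
            refine ⟨pvShape_set2 hsh2 (by omega) _, ?_⟩
            intro i j hi hj
            rw [pvGet2_set2 hsh2 (by omega) hi hj, hv]
            by_cases hij : l+1 = i ∧ l2+1 = j
            · rw [if_pos hij, if_pos (by right; right; omega), ← hij.1, ← hij.2]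
            · rw [if_neg hij, hget2 i j hi hj]
              have hiff : (i ≤ l ∨ j = 0 ∨ (i = l+1 ∧ j ≤ l2)) ↔
                  (i ≤ l ∨ j = 0 ∨ (i = l+1 ∧ j ≤ l2+1)) := by omega
              simp only [hiff])
      refine ⟨inner.1, ?_⟩
      intro i j hi hj
      rw [inner.2 i j hi hj]
      have hiff : (i ≤ l ∨ j = 0 ∨ (i = l+1 ∧ j ≤ n)) ↔ (i ≤ l+1 ∨ j = 0) := by
        constructor
        · intro h; omega
        · intro h
          rcases h with h | h
          · by_cases hil : i ≤ l
            · tauto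
            · right; right; exact ⟨by omega, hj⟩
          · tauto
      simp only [hiff])
  rw [main.2 i j hi hj, if_pos (by omega)]

-- ---- A side: the backtrack loop follows pvTrace once the table is correct ----

theorem pvBackA_eq (reference actual : List String) (dp : List (List Int)) (m n : Nat)
    (hdp : ∀ i j, i ≤ m → j ≤ n → pvGet2 dp i j = pvDpf reference actual i j) :
    ∀ fuel i j acc, i ≤ m → j ≤ n →
      pvBackA reference actual dp fuel i j acc =
        acc ++ pvTrace reference actual fuel i j := by
  intro fuel
  induction fuel with
  | zero =>
    intro i j acc hi hj
    simp [pvBackA, pvTrace]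
  | succ fuel ih =>
    intro i j acc hi hj
    simp only [pvBackA, pvTrace]
    rw [hdp i j hi hj, hdp (i-1) (j-1) (by omega) (by omega), hdp i (j-1) hi (by omega)]
    by_cases h00 : i = 0 ∧ j = 0
    · simp [h00]
    · rw [if_neg h00, if_neg h00]
      by_cases hm : 0 < i ∧ 0 < j ∧ reference.getD (i-1) "" = actual.getD (j-1) ""
      · rw [if_pos hm, if_pos hm, ih (i-1) (j-1) _ (by omega) (by omega)]
        simp
      · rw [if_neg hm, if_neg hm]
        by_cases hs : 0 < i ∧ 0 < j ∧
            pvDpf reference actual i j = pvDpf reference actual (i-1) (j-1) + 1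
        · rw [if_pos hs, if_pos hs, ih (i-1) (j-1) _ (by omega) (by omega)]
          simp
        · rw [if_neg hs, if_neg hs]
          by_cases hins : 0 < j ∧
              pvDpf reference actual i j = pvDpf reference actual i (j-1) + 1
          · rw [if_pos hins, if_pos hins, ih i (j-1) _ hi (by omega)]
            simp
          · rw [if_neg hins, if_neg hins, ih (i-1) j _ (by omega) hj]
            simp

-- ---- B side: the forward rows carry (pvDpf, pvTraceR) ----

def pvCellF (reference actual : List String) (i j : Nat) : pvCell :=
  (pvDpf reference actual i j, pvTraceR reference actual i j)

theorem pvUnwind_eq : ∀ t acc, pvUnwind t acc = acc ++ t := by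
  intro t
  induction t with
  | nil => intro acc; simp [pvUnwind]
  | cons e t ih => intro acc; simp [pvUnwind, ih]

theorem pvDrop_getD {α : Type} (xs : List α) (l : Nat) (y : α) (ys : List α)
    (h : xs.drop l = y :: ys) (d : α) : xs.getD l d = y := by
  have h2 : xs[l]? = some y := by
    have h3 : (xs.drop l)[0]? = xs[l+0]? := List.getElem?_drop
    rw [h] at h3
    simpa using h3.symm
  simp [List.getD_eq_getElem?_getD, h2]

theorem pvRow0_fold (reference actual : List String) :
    ∀ (ys : List String) (l : Nat), l ≤ actual.length → ys = actual.drop l →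
      ((PySem.List.enumerate ys ((l:Int)+1)).foldl
        (fun (st : List pvCell × pvCell) jw =>
          let cell : pvCell := (jw.1, pvInsRec jw.2 :: st.2.2)
          (st.1 ++ [cell], cell))
        ((List.range (l+1)).map (pvCellF reference actual 0), pvCellF reference actual 0 l))
      = ((List.range (actual.length+1)).map (pvCellF reference actual 0),
         pvCellF reference actual 0 actual.length) := by
  intro ys
  induction ys with
  | nil =>
    intro l hl hdrop
    have hlen : l = actual.length := by
      have := congrArg List.length hdrop
      simp at this
      omega
    subst hlen
    simp [PySem.List.enumerate]
  | cons y ys ih =>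
    intro l hl hdrop
    have hlt : l < actual.length := by
      have := congrArg List.length hdrop
      simp at this
      omega
    have hy : y = actual.getD l "" := (pvDrop_getD actual l y ys hdrop.symm "").symm
    rw [PySem.List.enumerate_cons, List.foldl_cons]
    have hcell : (((l:Int)+1, pvInsRec y :: (pvCellF reference actual 0 l).2) : pvCell)
        = pvCellF reference actual 0 (l+1) := by
      unfold pvCellF
      refine Prod.ext ?_ ?_
      · show (l:Int)+1 = pvDpf reference actual 0 (l+1)
        rw [pvDpf_zero_left]
        push_cast
        ring
      · show pvInsRec y :: pvTraceR reference actual 0 l = pvTraceR reference actual 0 (l+1)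
        rw [pvTraceR_row0, hy]
    have hnext : ys = actual.drop (l+1) := by
      have : actual.drop (l+1) = (actual.drop l).tail := by
        rw [← List.drop_drop]
        simp
      rw [this, ← hdrop]
      simp
    simp only [hcell]
    have hmerge : (List.range (l+1)).map (pvCellF reference actual 0) ++
        [pvCellF reference actual 0 (l+1)] =
        (List.range (l+1+1)).map (pvCellF reference actual 0) := by
      conv_rhs => rw [List.range_succ]
      rw [List.map_append]
      rfl
    rw [hmerge]
    have hc : ((l:Int)+1)+1 = (((l+1:Nat)):Int)+1 := by push_cast; ring
    rw [hc]
    exact ih (l+1) (by omega) hnext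

theorem pvInner_fold (reference actual : List String) (iN : Nat) (r : String)
    (hr : r = reference.getD iN "")
    (prev : List pvCell)
    (hprev : prev = (List.range (actual.length+1)).map (pvCellF reference actual iN)) :
    ∀ (ys : List String) (l : Nat), l ≤ actual.length → ys = actual.drop l →
      ((PySem.List.enumerate ys ((l:Int)+1)).foldl
        (fun (st : List pvCell × pvCell) jw =>
          let j := jw.1
          let w := jw.2
          let left := st.2
          let diag := PySem.List.pyGetD prev (j-1) ((0:Int), [])
          let up := PySem.List.pyGetD prev j ((0:Int), [])
          let cell : pvCell :=
            if r = w then (diag.1, pvCorrect r w :: diag.2)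
            else
              let c := 1 + min (min up.1 left.1) diag.1
              if c = diag.1 + 1 then (c, pvSub r w :: diag.2)
              else if c = left.1 + 1 then (c, pvInsRec w :: left.2)
              else (c, pvDelRec r :: up.2)
          (st.1 ++ [cell], cell))
        ((List.range (l+1)).map (pvCellF reference actual (iN+1)),
          pvCellF reference actual (iN+1) l))
      = ((List.range (actual.length+1)).map (pvCellF reference actual (iN+1)),
         pvCellF reference actual (iN+1) actual.length) := by
  intro ys
  induction ys with
  | nil =>
    intro l hl hdrop
    have hlen : l = actual.length := by
      have := congrArg List.length hdrop
      simp at this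
      omega
    subst hlen
    simp [PySem.List.enumerate]
  | cons y ys ih =>
    intro l hl hdrop
    have hlt : l < actual.length := by
      have := congrArg List.length hdrop
      simp at this
      omega
    have hy : y = actual.getD l "" := (pvDrop_getD actual l y ys hdrop.symm "").symm
    have hnext : ys = actual.drop (l+1) := by
      have : actual.drop (l+1) = (actual.drop l).tail := by
        rw [← List.drop_drop]
        simp
      rw [this, ← hdrop]
      simp
    rw [PySem.List.enumerate_cons, List.foldl_cons]
    -- the three reads from prev
    have hdiag : PySem.List.pyGetD prev (((l:Int)+1)-1) ((0:Int), ([]:List pvRec))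
        = pvCellF reference actual iN l := by
      have h1 : ((l:Int)+1)-1 = ((l:Nat):Int) := by ring
      rw [h1, PySem.List.pyGetD_natCast, hprev,
        PySem.List.getD_map_range _ _ _ _ (by omega)]
    have hup : PySem.List.pyGetD prev ((l:Int)+1) ((0:Int), ([]:List pvRec))
        = pvCellF reference actual iN (l+1) := by
      have h1 : ((l:Int)+1) = (((l+1:Nat)):Int) := by push_cast; ring
      rw [h1, PySem.List.pyGetD_natCast, hprev,
        PySem.List.getD_map_range _ _ _ _ (by omega)]
    have hcell := pvCellStep reference actual iN l r y hr (by rw [hy])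
    simp only [hdiag, hup]
    rw [show (pvCellF reference actual iN l).1 = pvDpf reference actual iN l from rfl,
      show (pvCellF reference actual iN l).2 = pvTraceR reference actual iN l from rfl,
      show (pvCellF reference actual iN (l+1)).1 = pvDpf reference actual iN (l+1) from rfl,
      show (pvCellF reference actual iN (l+1)).2 = pvTraceR reference actual iN (l+1) from rfl,
      show (pvCellF reference actual (iN+1) l).1 = pvDpf reference actual (iN+1) l from rfl,
      show (pvCellF reference actual (iN+1) l).2 = pvTraceR reference actual (iN+1) l from rfl]
    rw [hcell,
      show ((pvDpf reference actual (iN+1) (l+1), pvTraceR reference actual (iN+1) (l+1)) : pvCell)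
        = pvCellF reference actual (iN+1) (l+1) from rfl]
    have hmerge : (List.range (l+1)).map (pvCellF reference actual (iN+1)) ++
        [pvCellF reference actual (iN+1) (l+1)] =
        (List.range (l+1+1)).map (pvCellF reference actual (iN+1)) := by
      conv_rhs => rw [List.range_succ]
      rw [List.map_append]
      rfl
    rw [hmerge]
    have hc : ((l:Int)+1)+1 = (((l+1:Nat)):Int)+1 := by push_cast; ring
    rw [hc]
    exact ih (l+1) (by omega) hnext

theorem pvOuter_fold (reference actual : List String) :
    ∀ (ys : List String) (l : Nat), l ≤ reference.length → ys = reference.drop l →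
      ((PySem.List.enumerate ys ((l:Int)+1)).foldl
        (fun prev ir => pvRowStep reference actual prev ir.1 ir.2)
        ((List.range (actual.length+1)).map (pvCellF reference actual l)))
      = (List.range (actual.length+1)).map (pvCellF reference actual reference.length) := by
  intro ys
  induction ys with
  | nil =>
    intro l hl hdrop
    have hlen : l = reference.length := by
      have := congrArg List.length hdrop
      simp at this
      omega
    subst hlen
    simp [PySem.List.enumerate]
  | cons y ys ih =>
    intro l hl hdrop
    have hlt : l < reference.length := by
      have := congrArg List.length hdrop
      simp at this
      omega
    have hy : y = reference.getD l "" := (pvDrop_getD reference l y ys hdrop.symm "").symm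
    have hnext : ys = reference.drop (l+1) := by
      have : reference.drop (l+1) = (reference.drop l).tail := by
        rw [← List.drop_drop]
        simp
      rw [this, ← hdrop]
      simp
    rw [PySem.List.enumerate_cons, List.foldl_cons]
    have hstep : pvRowStep reference actual
        ((List.range (actual.length+1)).map (pvCellF reference actual l)) ((l:Int)+1) y =
        (List.range (actual.length+1)).map (pvCellF reference actual (l+1)) := by
      unfold pvRowStep
      have hfirst0 : PySem.List.pyGetD
          ((List.range (actual.length+1)).map (pvCellF reference actual l)) (0:Int)
          ((0:Int), ([]:List pvRec)) = pvCellF reference actual l 0 := by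
        rw [show (0:Int) = ((0:Nat):Int) from rfl, PySem.List.pyGetD_natCast,
          PySem.List.getD_map_range _ _ _ _ (by omega)]
      have hfirst : (((l:Int)+1, pvDelRec y :: (pvCellF reference actual l 0).2) : pvCell)
          = pvCellF reference actual (l+1) 0 := by
        refine Prod.ext ?_ ?_
        · show (l:Int)+1 = pvDpf reference actual (l+1) 0
          rw [pvDpf_zero_right]
          push_cast
          ring
        · show pvDelRec y :: pvTraceR reference actual l 0 = pvTraceR reference actual (l+1) 0
          rw [pvTraceR_col0, hy]
      have hinner := pvInner_fold reference actual l y hy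
        ((List.range (actual.length+1)).map (pvCellF reference actual l)) rfl
        actual 0 (by omega) (by simp)
      simp only [Nat.cast_zero, zero_add, List.range_one, List.map_cons, List.map_nil] at hinner
      simp only [hfirst0, hfirst]
      rw [hinner]
    rw [hstep]
    have hc : ((l:Int)+1)+1 = (((l+1:Nat)):Int)+1 := by push_cast; ring
    rw [hc]
    exact ih (l+1) (by omega) hnext

-- ===== VERDICT (by name: the statement is the Claim_ definition above) =====
theorem align_words_py_spec : Claim_equal_align_words_py := by
  intro reference actual _
  unfold Spec_align_words_py
  have hA : align_words_py reference actual =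
      (pvTraceR reference actual reference.length actual.length).reverse := by
    unfold align_words_py
    show (pvBackA reference actual
        (pvFillA reference actual reference.length actual.length)
        (reference.length + actual.length) reference.length actual.length []).reverse = _
    rw [pvBackA_eq reference actual _ reference.length actual.length
      (pvFillA_get reference actual reference.length actual.length)
      (reference.length + actual.length) reference.length actual.length [] (le_refl _)
      (le_refl _)]
    simp [pvTraceR]
  have hB : align_words_py_alt reference actual =
      (pvTraceR reference actual reference.length actual.length).reverse := by
    unfold align_words_py_alt
    have hc00 : (((0:Int), ([]:List pvRec)) : pvCell) = pvCellF reference actual 0 0 := by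
      refine Prod.ext ?_ ?_
      · show (0:Int) = pvDpf reference actual 0 0
        rw [pvDpf_zero_right]
        norm_num
      · show ([]:List pvRec) = pvTraceR reference actual 0 0
        rw [pvTraceR_zero]
    have hrow0 : pvRow0 actual = (List.range (actual.length+1)).map (pvCellF reference actual 0) := by
      unfold pvRow0
      have h := pvRow0_fold reference actual actual 0 (by omega) (by simp)
      simp only [Nat.cast_zero, zero_add, List.range_one, List.map_cons, List.map_nil] at h
      rw [hc00, h]
    rw [hrow0]
    have houter := pvOuter_fold reference actual reference 0 (by omega) (by simp)
    simp only [Nat.cast_zero, zero_add] at houter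
    rw [houter]
    have hnode : ((List.range (actual.length+1)).map
        (pvCellF reference actual reference.length)).getD actual.length ((0:Int), []) =
        pvCellF reference actual reference.length actual.length :=
      PySem.List.getD_map_range _ _ _ _ (by omega)
    show (pvUnwind (((List.map (pvCellF reference actual reference.length)
        (List.range (actual.length+1))).getD actual.length ((0:Int),[])).2) []).reverse = _
    rw [hnode, pvUnwind_eq]
    simp [pvCellF]
  rw [hA, hB]
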